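-- pv_equiv track=rewrite | github.com/eappleton/cellarchitect | developmental_tree/chirality_testing.py | intelligentPermutations
-- ===== SOURCE A (Python) =====
-- import itertools, pdb
--
-- def intelligentPermutations(colors):
--     perm1=itertools.permutations(range(6))
--     final_perm=[]
--     group1={1,2,4}
--     group2={3,5,6}
--     group1_indices=[0,1,3]
--     group2_indices=[2,4,5]
--     for p in perm1:
--         invalid=False
--         for i in group1_indices:
--             x=p[i]
--             if x in group2:
--                 invalid=True
--                 break
--         if not invalid:
--             for i in group2_indices:
--                 x=p[i]
--                 if x in group1:
--                     invalid=True
--                     break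
--         if not invalid:
--             these_colors=[colors[0]]
--             for x in p:
--                 these_colors.append(colors[x+1])
--             these_colors.append(colors[7])
--             final_perm.append(these_colors)
--     return final_perm
-- ===== SOURCE B (Python) =====
-- def intelligentPermutations(colors):
--     # constraints force positions 0,1,3 to hold {1,2,4} and positions 2,4,5 to hold {0,3,5};
--     # enumerate only the 36 valid permutations directly, in lex order
--     g1 = [1, 2, 4]
--     g2 = [0, 3, 5]
--     out = []
--     for p0 in g1:
--         for p1 in g1:
--             if p1 == p0:
--                 continue
--             p3 = [v for v in g1 if v != p0 and v != p1][0]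
--             for p2 in g2:
--                 for p4 in g2:
--                     if p4 == p2:
--                         continue
--                     p5 = [v for v in g2 if v != p2 and v != p4][0]
--                     out.append([colors[0]]
--                                + [colors[x + 1] for x in (p0, p1, p2, p3, p4, p5)]
--                                + [colors[7]])
--     return out
-- ===== Notes on version B (the rewrite author's own statement) =====
-- stated objective: simpler
-- what changed: Instead of generating all 720 permutations of range(6) and filtering them with per-index membership tests, B enumerates directly (by nested loops in lex order) only the 36 valid permutations, exploiting that the constraints force positions 0,1,3 to be a permutation of {1,2,4} and positions 2,4,5 a permutation of {0,3,5}.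
import Mathlib
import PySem

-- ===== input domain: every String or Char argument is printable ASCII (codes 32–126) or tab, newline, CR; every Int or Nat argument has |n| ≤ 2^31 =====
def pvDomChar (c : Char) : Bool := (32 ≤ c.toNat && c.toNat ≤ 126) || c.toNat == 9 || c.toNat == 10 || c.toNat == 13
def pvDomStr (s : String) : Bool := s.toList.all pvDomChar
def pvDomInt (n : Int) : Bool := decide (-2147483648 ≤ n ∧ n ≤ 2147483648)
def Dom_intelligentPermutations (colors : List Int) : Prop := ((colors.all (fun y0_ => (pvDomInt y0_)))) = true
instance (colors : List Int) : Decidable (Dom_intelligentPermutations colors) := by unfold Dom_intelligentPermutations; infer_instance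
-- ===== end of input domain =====

-- B replaces A's generate-all-720-permutations-and-filter by direct nested enumeration of the 36 valid permutations.

-- ===== PORT A =====
def intelligentPermutations (colors : List Int) : List (List Int) :=
  let perm1 := PySem.List.permutations (PySem.List.pyRange 0 6 1) 6
  let group1 : PySem.Set Int := PySem.Set.ofList [1, 2, 4]
  let group2 : PySem.Set Int := PySem.Set.ofList [3, 5, 6]
  let group1_indices : List Int := [0, 1, 3]
  let group2_indices : List Int := [2, 4, 5]
  perm1.foldl (fun final_perm p =>
    -- 'for i in …: if x in …: invalid=True; break' as a short-circuit fold over the index list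
    let invalid :=
      group1_indices.foldl (fun inv i =>
        if inv then inv else PySem.Set.contains group2 (PySem.List.pyGetD p i 0)) false
    let invalid :=
      if invalid then invalid else
        group2_indices.foldl (fun inv i =>
          if inv then inv else PySem.Set.contains group1 (PySem.List.pyGetD p i 0)) false
    if invalid then final_perm
    else
      let these_colors := p.foldl
        (fun acc x => acc ++ [PySem.List.pyGetD colors (x + 1) 0])
        [PySem.List.pyGetD colors 0 0]
      let these_colors := these_colors ++ [PySem.List.pyGetD colors 7 0]
      final_perm ++ [these_colors]) []

-- ===== PORT B =====
def intelligentPermutations_alt (colors : List Int) : List (List Int) :=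
  let g1 : List Int := [1, 2, 4]
  let g2 : List Int := [0, 3, 5]
  g1.foldl (fun out p0 =>
    g1.foldl (fun out p1 =>
      if p1 == p0 then out else
      let p3 := PySem.List.pyGetD (g1.filter (fun v => v ≠ p0 ∧ v ≠ p1)) 0 0
      g2.foldl (fun out p2 =>
        g2.foldl (fun out p4 =>
          if p4 == p2 then out else
          let p5 := PySem.List.pyGetD (g2.filter (fun v => v ≠ p2 ∧ v ≠ p4)) 0 0
          out ++ [[PySem.List.pyGetD colors 0 0]
                  ++ ([p0, p1, p2, p3, p4, p5].map (fun x => PySem.List.pyGetD colors (x + 1) 0))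
                  ++ [PySem.List.pyGetD colors 7 0]])
          out)
        out)
      out)
    []

-- ===== PRECONDITION & SPEC =====
-- Python A indexes elements 0 through 7 of colors: it raises IndexError when colors has fewer than 8 elements
def Pre_intelligentPermutations (colors : List Int) : Prop := 8 ≤ colors.length
instance (colors : List Int) : Decidable (Pre_intelligentPermutations colors) := by unfold Pre_intelligentPermutations; infer_instance
def pvWitness_intelligentPermutations : List Int := [0, 1, 2, 3, 4, 5, 6, 7]

def Spec_intelligentPermutations (colors : List Int) (out : List (List Int)) : Prop := out = intelligentPermutations_alt colors
instance (colors : List Int) (out : List (List Int)) : Decidable (Spec_intelligentPermutations colors out) := by unfold Spec_intelligentPermutations; infer_instance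

-- ===== CLAIM (what is proved, stated in full; the proofs are below) =====
def Claim_equal_intelligentPermutations : Prop := ∀ (colors : List Int), Dom_intelligentPermutations colors → Pre_intelligentPermutations colors → Spec_intelligentPermutations colors (intelligentPermutations colors)

-- ===== LEMMAS AND PROOFS =====

-- A's validity test on one permutation (exactly A's let-chain, factored out so it can be rewritten)
def pvBad (p : List Int) : Bool :=
  let invalid :=
    ([0, 1, 3] : List Int).foldl (fun inv i =>
      if inv then inv else PySem.Set.contains (PySem.Set.ofList [3, 5, 6]) (PySem.List.pyGetD p i 0)) false
  if invalid then invalid else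
    ([2, 4, 5] : List Int).foldl (fun inv i =>
      if inv then inv else PySem.Set.contains (PySem.Set.ofList [1, 2, 4]) (PySem.List.pyGetD p i 0)) false

-- A's these_colors construction on one permutation (exactly A's fold)
def pvRaw (colors : List Int) (p : List Int) : List Int :=
  (p.foldl (fun acc x => acc ++ [PySem.List.pyGetD colors (x + 1) 0]) [PySem.List.pyGetD colors 0 0])
    ++ [PySem.List.pyGetD colors 7 0]

def pvBuild (colors : List Int) (p : List Int) : List Int :=
  [PySem.List.pyGetD colors 0 0] ++ p.map (fun x => PySem.List.pyGetD colors (x + 1) 0)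
    ++ [PySem.List.pyGetD colors 7 0]

-- the 36 permutations A keeps, in A's emission order
def pvValid : List (List Int) := [[1, 2, 0, 4, 3, 5], [1, 2, 0, 4, 5, 3], [1, 2, 3, 4, 0, 5], [1, 2, 3, 4, 5, 0], [1, 2, 5, 4, 0, 3], [1, 2, 5, 4, 3, 0], [1, 4, 0, 2, 3, 5], [1, 4, 0, 2, 5, 3], [1, 4, 3, 2, 0, 5], [1, 4, 3, 2, 5, 0], [1, 4, 5, 2, 0, 3], [1, 4, 5, 2, 3, 0], [2, 1, 0, 4, 3, 5], [2, 1, 0, 4, 5, 3], [2, 1, 3, 4, 0, 5], [2, 1, 3, 4, 5, 0], [2, 1, 5, 4, 0, 3], [2, 1, 5, 4, 3, 0], [2, 4, 0, 1, 3, 5], [2, 4, 0, 1, 5, 3], [2, 4, 3, 1, 0, 5], [2, 4, 3, 1, 5, 0], [2, 4, 5, 1, 0, 3], [2, 4, 5, 1, 3, 0], [4, 1, 0, 2, 3, 5], [4, 1, 0, 2, 5, 3], [4, 1, 3, 2, 0, 5], [4, 1, 3, 2, 5, 0], [4, 1, 5, 2, 0, 3], [4, 1, 5, 2, 3, 0],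 [4, 2, 0, 1, 3, 5], [4, 2, 0, 1, 5, 3], [4, 2, 3, 1, 0, 5], [4, 2, 3, 1, 5, 0], [4, 2, 5, 1, 0, 3], [4, 2, 5, 1, 3, 0]]

set_option maxRecDepth 10000 in
theorem pvFilter_eq :
    (PySem.List.permutations (PySem.List.pyRange 0 6 1) 6).filter (fun p => !pvBad p) = pvValid := by
  decide

theorem pvRaw_eq (colors p : List Int) : pvRaw colors p = pvBuild colors p := by
  unfold pvRaw pvBuild
  rw [PySem.List.foldl_append_singleton_eq_map]

theorem A_eq (colors : List Int) :
    intelligentPermutations colors = pvValid.map (pvBuild colors) := by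
  have h1 : intelligentPermutations colors =
      (PySem.List.permutations (PySem.List.pyRange 0 6 1) 6).foldl
        (fun acc p => if pvBad p then acc else acc ++ [pvRaw colors p]) [] := rfl
  have hflip : (fun (acc : List (List Int)) (p : List Int) =>
        if pvBad p then acc else acc ++ [pvRaw colors p])
      = (fun acc p => if (!pvBad p) = true then acc ++ [pvRaw colors p] else acc) := by
    funext acc p
    cases pvBad p <;> simp
  rw [h1, hflip, PySem.List.foldl_append_if, pvFilter_eq]
  simp [pvRaw_eq]

set_option maxRecDepth 10000 in
theorem B_eq (colors : List Int) :
    intelligentPermutations_alt colors = pvValid.map (pvBuild colors) := by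
  simp [intelligentPermutations_alt, pvValid, pvBuild]

-- ===== VERDICT (by name: the statement is the Claim_ definition above) =====
theorem intelligentPermutations_spec : Claim_equal_intelligentPermutations := by
  intro colors _ _
  unfold Spec_intelligentPermutations
  rw [A_eq, B_eq]
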